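-- pv_equiv track=rewrite | github.com/mth-farias/Cursor | Codes_Working/BehaviorClassifier/_utils.py | iter_label_runs
-- ===== SOURCE A (Python) =====
-- from typing import Iterator, Sequence, Tuple, Optional, Dict
--
-- def iter_label_runs(labels: Sequence[object]) -> Iterator[tuple[int, int, object]]:
--     """
--     Yield (start_index, end_index_exclusive, value) for each contiguous run of labels.
--
--     Behavior
--       - Works with strings, numbers, and other hashable objects.
--       - NaNs are treated as distinct values and segmented like any other.
--       - Returns an iterator of tuples.
--     """
--     if len(labels) == 0:
--         return iter([])
--
--     start_index = 0
--     current_value = labels[0]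
--
--     for index in range(1, len(labels)):
--         if labels[index] != current_value:
--             yield (start_index, index, current_value)
--             start_index = index
--             current_value = labels[index]
--
--     # Final run
--     yield (start_index, len(labels), current_value)
-- ===== SOURCE B (Python) =====
-- def iter_label_runs(labels):
--     """Two-pass: collect run boundaries, then emit (lo, hi, labels[lo]) per pair."""
--     if len(labels) == 0:
--         return []
--     n = len(labels)
--     bounds = [0]
--     for i in range(1, n):
--         if labels[i] != labels[i - 1]:
--             bounds.append(i)
--     bounds.append(n)
--     return [(lo, hi, labels[lo]) for lo, hi in zip(bounds, bounds[1:])]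
-- ===== Notes on version B (the rewrite author's own statement) =====
-- stated objective: alternative
-- what changed: Replaces the single-pass running start/current_value generator by a two-pass algorithm that first materializes a boundary index list (0, every adjacent-change index, n) and then maps consecutive boundary pairs to (lo, hi, labels[lo]).
import Mathlib
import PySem

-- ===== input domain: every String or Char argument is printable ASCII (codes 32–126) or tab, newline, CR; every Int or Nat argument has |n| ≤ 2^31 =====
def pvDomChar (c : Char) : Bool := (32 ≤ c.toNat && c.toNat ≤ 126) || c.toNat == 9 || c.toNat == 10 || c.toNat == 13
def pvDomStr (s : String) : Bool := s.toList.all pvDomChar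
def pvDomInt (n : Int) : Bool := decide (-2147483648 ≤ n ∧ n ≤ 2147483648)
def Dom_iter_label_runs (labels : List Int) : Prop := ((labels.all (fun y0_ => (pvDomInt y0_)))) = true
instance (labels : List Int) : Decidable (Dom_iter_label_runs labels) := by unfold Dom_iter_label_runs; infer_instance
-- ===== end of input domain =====

-- B replaces A's running start/current_value single pass by a two-pass boundary-index
-- algorithm (alternative decomposition, same cost); equivalence is about the materialized
-- sequence of yielded tuples (both Pythons return iterators).

-- ===== PORT A =====
-- one loop step of A: yield (append to acc) and reset start/cur when the label changes
def iterStepA (labels : List Int) (st : Int × Int × List (Int × Int × Int)) (index : Int) :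
    Int × Int × List (Int × Int × Int) :=
  let v := PySem.List.pyGetD labels index 0
  if v ≠ st.2.1 then (index, v, st.2.2 ++ [(st.1, index, st.2.1)]) else st

def iter_label_runs (labels : List Int) : List (Int × Int × Int) :=
  if labels.length = 0 then []
  else
    let st := (PySem.List.pyRange 1 (labels.length : Int) 1).foldl (iterStepA labels)
      (0, PySem.List.pyGetD labels 0 0, [])
    st.2.2 ++ [(st.1, (labels.length : Int), st.2.1)]

-- ===== PORT B =====
def iter_label_runs_alt (labels : List Int) : List (Int × Int × Int) :=
  if labels.isEmpty then []
  else
    let n : Int := labels.length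
    let bounds : List Int :=
      0 :: ((PySem.List.pyRange 1 n 1).filter
        (fun i => PySem.List.pyGetD labels i 0 ≠ PySem.List.pyGetD labels (i - 1) 0) ++ [n])
    (bounds.zip bounds.tail).map (fun p => (p.1, p.2, PySem.List.pyGetD labels p.1 0))

-- ===== PRECONDITION & SPEC =====
def Spec_iter_label_runs (labels : List Int) (out : List (Int × Int × Int)) : Prop := out = iter_label_runs_alt labels
instance (labels : List Int) (out : List (Int × Int × Int)) : Decidable (Spec_iter_label_runs labels out) := by unfold Spec_iter_label_runs; infer_instance

-- ===== CLAIM (what is proved, stated in full; the proofs are below) =====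
def Claim_equal_iter_label_runs : Prop := ∀ (labels : List Int), Dom_iter_label_runs labels → Spec_iter_label_runs labels (iter_label_runs labels)

-- ===== LEMMAS AND PROOFS =====

-- reference recursion: runs of labels.drop pos, with current run starting at `start` with value `cur`
def refRuns (pos start cur : Int) : List Int → List (Int × Int × Int)
  | [] => [(start, pos, cur)]
  | x :: xs => if x ≠ cur then (start, pos, cur) :: refRuns (pos + 1) pos x xs
               else refRuns (pos + 1) start cur xs

lemma lt_of_drop (labels : List Int) (a : Int) (x : Int) (xs : List Int)
    (h : labels.drop a.toNat = x :: xs) : a.toNat < labels.length := by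
  by_contra hc
  rw [List.drop_eq_nil_of_le (Nat.le_of_not_lt hc)] at h
  cases h

lemma get_of_drop (labels : List Int) (a : Int) (x : Int) (xs : List Int)
    (ha : 0 ≤ a) (h : labels.drop a.toNat = x :: xs) :
    PySem.List.pyGetD labels a 0 = x := by
  have hlt : a.toNat < labels.length := lt_of_drop labels a x xs h
  rw [PySem.List.pyGetD_eq_getElem labels 0 ha (by omega)]
  have hg := List.getElem_drop (xs := labels) (i := a.toNat) (j := 0)
    (h := by rw [h]; simp)
  simp [h] at hg
  simpa using hg.symm

lemma drop_succ_of_drop (labels : List Int) (a : Int) (x : Int) (xs : List Int)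
    (ha : 0 ≤ a) (h : labels.drop a.toNat = x :: xs) :
    labels.drop (a + 1).toNat = xs := by
  have h1 : (a + 1).toNat = a.toNat + 1 := by omega
  rw [h1, ← List.drop_drop, h]
  rfl

lemma foldA_eq (labels : List Int) :
    ∀ (rest : List Int) (a start cur : Int) (acc : List (Int × Int × Int)),
    0 ≤ a → a ≤ (labels.length : Int) → labels.drop a.toNat = rest →
    (let st := (PySem.List.pyRange a (labels.length : Int) 1).foldl (iterStepA labels) (start, cur, acc)
     st.2.2 ++ [(st.1, (labels.length : Int), st.2.1)]) = acc ++ refRuns a start cur rest := by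
  intro rest
  induction rest with
  | nil =>
    intro a start cur acc ha hle hdrop
    have hnil := List.drop_eq_nil_iff.mp hdrop
    have ha' : a = (labels.length : Int) := by omega
    subst ha'
    simp [PySem.List.pyRange_one_eq_nil le_rfl, refRuns]
  | cons x xs ih =>
    intro a start cur acc ha hle hdrop
    have hlt : a < (labels.length : Int) := by
      have := lt_of_drop labels a x xs hdrop
      omega
    rw [PySem.List.pyRange_one_cons hlt]
    have hget := get_of_drop labels a x xs ha hdrop
    have hdrop' := drop_succ_of_drop labels a x xs ha hdrop
    simp only [List.foldl_cons]
    by_cases hne : x = cur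
    · have hstep : iterStepA labels (start, cur, acc) a = (start, cur, acc) := by
        simp [iterStepA, hget, hne]
      rw [hstep, ih (a + 1) start cur acc (by omega) (by omega) hdrop']
      simp [refRuns, hne]
    · have hstep : iterStepA labels (start, cur, acc) a = (a, x, acc ++ [(start, a, cur)]) := by
        simp [iterStepA, hget, hne]
      rw [hstep, ih (a + 1) a x (acc ++ [(start, a, cur)]) (by omega) (by omega) hdrop']
      simp [refRuns, hne]

lemma zipMapB (labels : List Int) :
    ∀ (rest : List Int) (a lo cur : Int),
    0 ≤ lo → 1 ≤ a → a ≤ (labels.length : Int) → labels.drop a.toNat = rest →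
    PySem.List.pyGetD labels (a - 1) 0 = cur → PySem.List.pyGetD labels lo 0 = cur →
    (let bounds : List Int :=
        lo :: ((PySem.List.pyRange a (labels.length : Int) 1).filter
          (fun i => PySem.List.pyGetD labels i 0 ≠ PySem.List.pyGetD labels (i - 1) 0) ++ [(labels.length : Int)])
     (bounds.zip bounds.tail).map (fun p => (p.1, p.2, PySem.List.pyGetD labels p.1 0)))
      = refRuns a lo cur rest := by
  intro rest
  induction rest with
  | nil =>
    intro a lo cur hlo ha hle hdrop hprev hlo_val
    have hnil := List.drop_eq_nil_iff.mp hdrop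
    have ha' : a = (labels.length : Int) := by omega
    subst ha'
    simp [PySem.List.pyRange_one_eq_nil le_rfl, refRuns, hlo_val]
  | cons x xs ih =>
    intro a lo cur hlo ha hle hdrop hprev hlo_val
    have hlt : a < (labels.length : Int) := by
      have := lt_of_drop labels a x xs hdrop
      omega
    rw [PySem.List.pyRange_one_cons hlt]
    have hget := get_of_drop labels a x xs (by omega) hdrop
    have hdrop' := drop_succ_of_drop labels a x xs (by omega) hdrop
    have hprev' : PySem.List.pyGetD labels (a + 1 - 1) 0 = x := by
      simpa using hget
    by_cases hne : x = cur
    · rw [List.filter_cons_of_neg (by simp [hget, hprev, hne])]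
      have hres := ih (a + 1) lo cur hlo (by omega) (by omega) hdrop'
        (by rw [hprev', hne]) hlo_val
      simpa [refRuns, hne] using hres
    · rw [List.filter_cons_of_pos (by simp [hget, hprev, hne])]
      have hres := ih (a + 1) a x (by omega) (by omega) (by omega) hdrop' hprev' hget
      simp only [List.cons_append, List.zip_cons_cons, List.tail_cons, List.map_cons] at hres ⊢
      rw [hres]
      simp [refRuns, hne, hlo_val]

-- ===== VERDICT (by name: the statement is the Claim_ definition above) =====
theorem iter_label_runs_spec : Claim_equal_iter_label_runs := by
  unfold Claim_equal_iter_label_runs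
  intro labels _
  unfold Spec_iter_label_runs
  match labels with
  | [] => rfl
  | l :: ls =>
    have hA := foldA_eq (l :: ls) ls 1 0 l [] (by omega)
      (by simp) (by rfl)
    have hB := zipMapB (l :: ls) ls 1 0 l (by omega) le_rfl
      (by simp) (by rfl)
      (by norm_num [PySem.List.pyGetD_zero_cons]) (by simp [PySem.List.pyGetD_zero_cons])
    simp only [iter_label_runs, iter_label_runs_alt, List.length_cons, List.isEmpty_cons,
      PySem.List.pyGetD_zero_cons]
    rw [if_neg (by omega), if_neg (by simp)]
    simp only [List.nil_append] at hA
    rw [show ((ls.length + 1 : Nat) : Int) = (((l :: ls).length : Nat) : Int) by simp]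
    rw [hA]
    exact hB.symm
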